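-- pv_equiv track=rewrite | github.com/Zenor27/naptaled | src/display_whos_that_pokemon.py | image_bottom_to_top
-- ===== SOURCE A (Python) =====
-- from typing import Iterable, Optional
--
-- def image_bottom_to_top(image_pixels: list[tuple[int, int, int]]) -> Iterable[list[tuple[int, int, int]]]:
--     image_pixel_len = len(image_pixels)
--     new_pixels: list[Optional[tuple[int, int, int]]] = [None] * image_pixel_len  # Start with a list of None
--
--     non_white_count = 0
--
--     # Iterate through the pixels in reverse order (bottom left to top right)
--     for i in range(image_pixel_len - 1, -1, -1):
--         pixel = image_pixels[i]
--         new_pixels[i] = pixel  # Add the pixel to the appropriate position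
--
--         if pixel != (255, 255, 255):  # Check if the pixel is not white
--             non_white_count += 1
--
--             if non_white_count % 5 == 0:
--                 # Add remaining black pixels to complete the image
--                 completed_image = [(p if p is not None else (0, 0, 0)) for p in new_pixels]
--                 yield completed_image
--                 non_white_count = 0
--
--     yield image_pixels  # Finally, yield the complete image
-- ===== SOURCE B (Python) =====
-- def image_bottom_to_top(image_pixels):
--     # Pass 1: walk the pixels in reverse, recording the index of every 5th
--     # non-white pixel (count resets at each boundary) as a frame boundary.
--     boundaries = []
--     count = 0
--     for i in range(len(image_pixels) - 1, -1, -1):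
--         if image_pixels[i] != (255, 255, 255):
--             count += 1
--             if count == 5:
--                 boundaries.append(i)
--                 count = 0
--     # Pass 2: each boundary b yields the closed-form snapshot
--     # (black padding up to b, then the already-revealed suffix).
--     for b in boundaries:
--         yield [(0, 0, 0)] * b + image_pixels[b:]
--     yield image_pixels  # the original list object, uncopied
-- ===== Notes on version B (the rewrite author's own statement) =====
-- stated objective: alternative
-- what changed: Replaces A's mutated Optional array and per-yield None-to-black comprehension by a separate reverse boundary-detection pass followed by closed-form frames replicate(b)*black + suffix.
import Mathlib
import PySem

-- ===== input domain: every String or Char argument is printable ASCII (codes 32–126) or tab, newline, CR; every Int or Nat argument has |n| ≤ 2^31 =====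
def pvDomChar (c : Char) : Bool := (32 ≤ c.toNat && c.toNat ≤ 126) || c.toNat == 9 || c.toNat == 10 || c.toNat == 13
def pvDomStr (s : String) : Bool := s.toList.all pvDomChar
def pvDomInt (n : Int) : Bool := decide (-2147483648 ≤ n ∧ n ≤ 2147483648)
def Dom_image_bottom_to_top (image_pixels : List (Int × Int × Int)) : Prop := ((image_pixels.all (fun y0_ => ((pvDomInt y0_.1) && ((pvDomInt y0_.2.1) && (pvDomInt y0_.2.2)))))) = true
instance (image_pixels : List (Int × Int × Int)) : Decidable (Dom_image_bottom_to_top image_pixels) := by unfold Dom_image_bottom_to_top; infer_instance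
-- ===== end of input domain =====

-- ===== PORT A =====
-- A's reverse for-loop: structural recursion on j, current Python index i = j-1
-- (px[i] is in range throughout, so List.getD is exact for the Python indexing).
def pvGoA (px : List (Int × Int × Int)) :
    Nat → List (Option (Int × Int × Int)) → Nat → List (List (Int × Int × Int))
  | 0, _, _ => [px]
  | j+1, newp, cnt =>
      let pixel := px.getD j (0, 0, 0)
      let newp' := newp.set j (some pixel)
      if pixel ≠ (255, 255, 255) then
        if (cnt + 1) % 5 = 0 then
          (newp'.map (fun p => p.getD (0, 0, 0))) :: pvGoA px j newp' 0
        else pvGoA px j newp' (cnt + 1)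
      else pvGoA px j newp' cnt

def image_bottom_to_top (image_pixels : List (Int × Int × Int)) : List (List (Int × Int × Int)) :=
  pvGoA image_pixels image_pixels.length (List.replicate image_pixels.length none) 0

-- ===== PORT B =====
-- B pass 1: reverse walk recording boundary indices (every 5th non-white, count resets).
def pvBnds (px : List (Int × Int × Int)) : Nat → Nat → List Nat
  | 0, _ => []
  | j+1, cnt =>
      if px.getD j (0, 0, 0) ≠ (255, 255, 255) then
        if cnt + 1 = 5 then j :: pvBnds px j 0
        else pvBnds px j (cnt + 1)
      else pvBnds px j cnt

-- B pass 2: closed-form frame per boundary, then the full image.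
def image_bottom_to_top_alt (image_pixels : List (Int × Int × Int)) : List (List (Int × Int × Int)) :=
  (pvBnds image_pixels image_pixels.length 0).map
    (fun b => List.replicate b (0, 0, 0) ++ image_pixels.drop b) ++ [image_pixels]

-- ===== PRECONDITION & SPEC =====
def Spec_image_bottom_to_top (image_pixels : List (Int × Int × Int)) (out : List (List (Int × Int × Int))) : Prop := out = image_bottom_to_top_alt image_pixels
instance (image_pixels : List (Int × Int × Int)) (out : List (List (Int × Int × Int))) : Decidable (Spec_image_bottom_to_top image_pixels out) := by unfold Spec_image_bottom_to_top; infer_instance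

-- ===== CLAIM (what is proved, stated in full; the proofs are below) =====
def Claim_equal_image_bottom_to_top : Prop := ∀ (image_pixels : List (Int × Int × Int)), Dom_image_bottom_to_top image_pixels → Spec_image_bottom_to_top image_pixels (image_bottom_to_top image_pixels)

-- ===== LEMMAS AND PROOFS =====

lemma pvState_set (px : List (Int × Int × Int)) (j : Nat) (h : j < px.length) :
    (List.replicate (j+1) (none : Option (Int × Int × Int)) ++ (px.drop (j+1)).map some).set j
      (some (px.getD j (0,0,0)))
    = List.replicate j none ++ (px.drop j).map some := by
  have hd : px.drop j = px.getD j (0,0,0) :: px.drop (j+1) := by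
    rw [List.getD_eq_getElem px _ h, List.drop_eq_getElem_cons h]
  rw [hd, List.replicate_succ' , List.map_cons, List.append_assoc, List.singleton_append,
    List.set_append_right _ _ (by simp), List.length_replicate, Nat.sub_self, List.set_cons_zero]

lemma pvFrame_eq (px : List (Int × Int × Int)) (j : Nat) :
    (List.replicate j (none : Option (Int × Int × Int)) ++ (px.drop j).map some).map
      (fun p => p.getD (0,0,0))
    = List.replicate j (0,0,0) ++ px.drop j := by
  simp

lemma pv_key (px : List (Int × Int × Int)) :
    ∀ (j cnt : Nat), j ≤ px.length → cnt < 5 →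
    pvGoA px j (List.replicate j none ++ (px.drop j).map some) cnt
      = (pvBnds px j cnt).map (fun b => List.replicate b (0,0,0) ++ px.drop b) ++ [px] := by
  intro j
  induction j with
  | zero => intro cnt _ _; simp [pvGoA, pvBnds]
  | succ j ih =>
    intro cnt hj hcnt
    have hjlt : j < px.length := hj
    have hA : pvGoA px (j+1) (List.replicate (j+1) none ++ (px.drop (j+1)).map some) cnt
        = (if px.getD j (0,0,0) ≠ (255,255,255) then
             if (cnt + 1) % 5 = 0 then
               (((List.replicate (j+1) none ++ (px.drop (j+1)).map some).set j
                   (some (px.getD j (0,0,0)))).map (fun p : Option (Int × Int × Int) => p.getD (0,0,0)))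
                 :: pvGoA px j ((List.replicate (j+1) none ++ (px.drop (j+1)).map some).set j
                   (some (px.getD j (0,0,0)))) 0
             else pvGoA px j ((List.replicate (j+1) none ++ (px.drop (j+1)).map some).set j
                   (some (px.getD j (0,0,0)))) (cnt + 1)
           else pvGoA px j ((List.replicate (j+1) none ++ (px.drop (j+1)).map some).set j
                   (some (px.getD j (0,0,0)))) cnt) := rfl
    have hB : pvBnds px (j+1) cnt
        = (if px.getD j (0,0,0) ≠ (255,255,255) then
             if cnt + 1 = 5 then j :: pvBnds px j 0 else pvBnds px j (cnt + 1)
           else pvBnds px j cnt) := rfl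
    rw [hA, hB, pvState_set px j hjlt]
    by_cases hw : px.getD j (0,0,0) ≠ (255,255,255)
    · rw [if_pos hw, if_pos hw]
      by_cases h5 : cnt + 1 = 5
      · rw [if_pos (by omega : (cnt + 1) % 5 = 0), if_pos h5,
          pvFrame_eq, ih 0 (le_of_lt hjlt) (by omega)]
        simp
      · rw [if_neg (by omega : ¬ (cnt + 1) % 5 = 0), if_neg h5]
        exact ih (cnt+1) (le_of_lt hjlt) (by omega)
    · rw [if_neg hw, if_neg hw]
      exact ih cnt (le_of_lt hjlt) hcnt

-- ===== VERDICT (by name: the statement is the Claim_ definition above) =====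
theorem image_bottom_to_top_spec : Claim_equal_image_bottom_to_top := by
  intro px _
  unfold Spec_image_bottom_to_top image_bottom_to_top image_bottom_to_top_alt
  have h := pv_key px px.length 0 le_rfl (by omega)
  simpa using h
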